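-- pv_equiv track=rewrite | github.com/MontyOharra/eto_js | server/src/features/htc_integration/service.py | generate_keycounts
-- ===== SOURCE A (Python) =====
-- from typing import Any, Dict, Optional, TYPE_CHECKING
--
-- def generate_keycounts(keycheck: str) -> str:
--     """
--     Generate the FavKeyCounts value from a keycheck string.
--
--     Algorithm (replicates VBA logic):
--     1. Count occurrences of each character in keycheck
--     2. Sort alphabetically by character
--     3. Format as: "A,5;B,3;C,1;..." (character,count pairs separated by semicolons)
--
--     Args:
--         keycheck: The keycheck string to analyze
--
--     Returns:
--         Formatted character count string (max 255 chars to fit VARCHAR(255))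
--     """
--     if not keycheck:
--         return ''
--
--     # Count character occurrences
--     char_counts: Dict[str, int] = {}
--     for char in keycheck:
--         char_counts[char] = char_counts.get(char, 0) + 1
--
--     # Sort alphabetically by character
--     sorted_chars = sorted(char_counts.keys())
--
--     # Build result string: "A,5;B,3;..."
--     parts = [f"{char},{char_counts[char]}" for char in sorted_chars]
--     result = ';'.join(parts) + ';'
--
--     # Truncate to 255 chars (VARCHAR(255) limit)
--     return result[:255]
-- ===== SOURCE B (Python) =====
-- def generate_keycounts(keycheck: str) -> str:
--     """Sort the characters and scan runs of equal characters in one pass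
--     with no frequency dict: each run of equal characters yields one pair."""
--     chars = sorted(keycheck)
--     if not chars:
--         return ''
--     out = []
--     run_char = chars[0]
--     run_len = 0
--     for c in chars:
--         if c == run_char:
--             run_len += 1
--         else:
--             out.append(f"{run_char},{run_len};")
--             run_char = c
--             run_len = 1
--     out.append(f"{run_char},{run_len};")
--     return ''.join(out)[:255]
-- ===== Notes on version B (the rewrite author's own statement) =====
-- stated objective: alternative
-- what changed: Instead of building a character-frequency dict and then sorting its keys, B sorts the characters once and emits one comma-separated pair per run of equal characters in a single scan, with no dict at all.
import Mathlib
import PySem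

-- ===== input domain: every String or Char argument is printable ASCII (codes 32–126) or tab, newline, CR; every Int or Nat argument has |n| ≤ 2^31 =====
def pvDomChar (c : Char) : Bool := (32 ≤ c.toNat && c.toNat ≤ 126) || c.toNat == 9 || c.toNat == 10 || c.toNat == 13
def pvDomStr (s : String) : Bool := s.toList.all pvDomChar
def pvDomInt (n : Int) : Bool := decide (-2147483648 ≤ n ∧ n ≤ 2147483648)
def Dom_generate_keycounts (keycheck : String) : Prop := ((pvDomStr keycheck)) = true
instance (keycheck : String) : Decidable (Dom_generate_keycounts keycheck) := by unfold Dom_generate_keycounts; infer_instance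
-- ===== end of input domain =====

-- B sorts the characters once and scans runs of equal characters (no frequency dict); alternative decomposition, same value.

-- ===== PORT A =====
def generate_keycounts (keycheck : String) : String :=
  if keycheck.toList.isEmpty then "" else
    let char_counts : PySem.Dict Char Int :=
      keycheck.toList.foldl (fun d c => d.insert c (d.getD c 0 + 1)) PySem.Dict.empty
    let sorted_chars := PySem.List.sorted char_counts.keys (fun x => x) false
    let parts := sorted_chars.map (fun c => [c] ++ [','] ++ PySem.Int.toChars (char_counts.getD c 0))
    let result := PySem.Chars.join [';'] parts ++ [';']
    String.ofList (PySem.List.slice result none (some 255))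

-- ===== PORT B =====
-- one formatted part "c,n;" as chars
def kcFmt (c : Char) (n : Int) : List Char := [c, ','] ++ PySem.Int.toChars n ++ [';']

-- one step of Source B's run-scan loop; state = (out, run_char, run_len)
def kcStep (st : List (List Char) × Char × Int) (c : Char) : List (List Char) × Char × Int :=
  if c = st.2.1 then (st.1, st.2.1, st.2.2 + 1) else (st.1 ++ [kcFmt st.2.1 st.2.2], c, 1)

def generate_keycounts_alt (keycheck : String) : String :=
  match PySem.List.sorted keycheck.toList (fun x => x) false with
  | [] => ""
  | c0 :: rest =>
    let st := (c0 :: rest).foldl kcStep ([], c0, 0)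
    String.ofList (PySem.List.slice ((st.1 ++ [kcFmt st.2.1 st.2.2]).flatten) none (some 255))

-- ===== PRECONDITION & SPEC =====
def Spec_generate_keycounts (keycheck : String) (out : String) : Prop := out = generate_keycounts_alt keycheck
instance (keycheck : String) (out : String) : Decidable (Spec_generate_keycounts keycheck out) := by unfold Spec_generate_keycounts; infer_instance

-- ===== CLAIM (what is proved, stated in full; the proofs are below) =====
def Claim_equal_generate_keycounts : Prop := ∀ (keycheck : String), Dom_generate_keycounts keycheck → Spec_generate_keycounts keycheck (generate_keycounts keycheck)

-- ===== LEMMAS AND PROOFS =====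

-- ';'.join(parts) + ';' is the concatenation of the parts each with ';' appended (nonempty parts)
theorem kc_join_semi (ps : List (List Char)) (h : ps ≠ []) :
    PySem.Chars.join [';'] ps ++ [';'] = (ps.map (· ++ [';'])).flatten := by
  induction ps with
  | nil => exact absurd rfl h
  | cons p ps ih =>
    cases ps with
    | nil => simp [PySem.Chars.join, List.intercalate]
    | cons q qs =>
      rw [PySem.Chars.join_cons_cons]
      simp only [List.map_cons, List.flatten_cons] at ih ⊢
      rw [List.append_assoc, List.append_assoc, ih (by simp)]
      simp

-- running the scan over a run of the current character only bumps the counter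
theorem kc_run (n : Nat) : ∀ (c : Char) (out : List (List Char)) (m : Int),
    (List.replicate n c).foldl kcStep (out, c, m) = (out, c, m + n) := by
  induction n with
  | zero => intro c out m; simp
  | succ k ih =>
    intro c out m
    rw [List.replicate_succ, List.foldl_cons]
    show (List.replicate k c).foldl kcStep (kcStep (out, c, m) c) = _
    rw [show kcStep (out, c, m) c = (out, c, m + 1) by simp [kcStep]]
    rw [ih]
    simp [Prod.ext_iff]
    omega

-- the scan over grouped runs emits one part per run
theorem kc_loop (ks : List Char) (cnt : Char → Nat) :
    ∀ (c : Char) (out : List (List Char)) (m : Int),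
    (c :: ks).Pairwise (· ≠ ·) → (∀ k ∈ ks, 1 ≤ cnt k) →
    (let st := ((ks.map (fun k => List.replicate (cnt k) k)).flatten).foldl kcStep (out, c, m)
     st.1 ++ [kcFmt st.2.1 st.2.2]) = out ++ kcFmt c m :: ks.map (fun k => kcFmt k (cnt k)) := by
  induction ks with
  | nil => intro c out m _ _; simp
  | cons k ks ih =>
    intro c out m hch hcnt
    have hck : c ≠ k := (List.pairwise_cons.mp hch).1 k (by simp)
    have hk1 : 1 ≤ cnt k := hcnt k (by simp)
    simp only [List.map_cons, List.flatten_cons, List.foldl_append]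
    have hrep : List.replicate (cnt k) k = k :: List.replicate (cnt k - 1) k := by
      rw [← List.replicate_succ]; congr 1; omega
    rw [hrep, List.foldl_cons]
    rw [show kcStep (out, c, m) k = (out ++ [kcFmt c m], k, 1) by
      simp [kcStep, (Ne.symm hck)]]
    rw [kc_run]
    have : (1 : Int) + ((cnt k - 1 : Nat) : Int) = (cnt k : Int) := by omega
    rw [this]
    have := ih k (out ++ [kcFmt c m]) (cnt k) (List.pairwise_cons.mp hch).2
      (fun x hx => hcnt x (by simp [hx]))
    simp only at this ⊢
    rw [this]; simp

-- sum of an if-indicator over a Nodup list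
theorem kc_sum_ite (a : Char) (f : Char → Nat) :
    ∀ (ks : List Char), ks.Nodup →
    (ks.map (fun c => if c = a then f c else 0)).sum = if a ∈ ks then f a else 0 := by
  intro ks
  induction ks with
  | nil => simp
  | cons k ks ih =>
    intro hnd
    rcases List.nodup_cons.mp hnd with ⟨hk, hnd'⟩
    simp only [List.map_cons, List.sum_cons, ih hnd', List.mem_cons]
    by_cases hka : k = a
    · subst hka; simp [hk]
    · have hak : ¬ a = k := fun h => hka h.symm
      by_cases hma : a ∈ ks
      · simp [hka, hma, hak]
      · simp [hka, hma, hak]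

-- sorted(l) is the concatenation of runs: one run of length count(k,l) per distinct k in sorted order
theorem kc_sorted_flatten (l : List Char) :
    PySem.List.sorted l (fun x => x) false =
      ((PySem.List.sorted (PySem.Set.ofList l) (fun x => x) false).map
        (fun k => List.replicate (l.count k) k)).flatten := by
  set ks := PySem.List.sorted (PySem.Set.ofList l) (fun x => x) false with hks
  have hpw : ks.Pairwise (· < ·) := PySem.List.sorted_ofList_pairwise_lt l
  have hnd : ks.Nodup := hpw.imp ne_of_lt
  have hmem : ∀ a, a ∈ ks ↔ a ∈ l := by
    intro a
    rw [hks, PySem.List.mem_sorted, PySem.Set.mem_ofList]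
  apply PySem.List.sorted_id_eq_of_perm_of_pairwise
  · rw [List.perm_iff_count]
    intro a
    rw [List.count_flatten]
    simp only [List.map_map, Function.comp_def, List.count_replicate, beq_iff_eq]
    rw [kc_sum_ite a (fun c => l.count c) ks hnd]
    by_cases h : a ∈ l
    · simp [(hmem a).mpr h]
    · rw [if_neg (fun hh => h ((hmem a).mp hh))]
      exact (List.count_eq_zero.mpr h).symm
  · rw [List.pairwise_flatten]
    refine ⟨?_, ?_⟩
    · intro t ht
      simp only [List.mem_map] at ht
      obtain ⟨k, _, rfl⟩ := ht
      exact List.pairwise_replicate.mpr (Or.inr le_rfl)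
    · rw [List.pairwise_map]
      refine hpw.imp_of_mem ?_
      intro k1 k2 _ _ hlt x hx y hy
      rw [List.eq_of_mem_replicate hx, List.eq_of_mem_replicate hy]
      exact le_of_lt hlt

theorem kc_main (keycheck : String) : Spec_generate_keycounts keycheck (generate_keycounts keycheck) := by
  unfold Spec_generate_keycounts
  by_cases hemp : keycheck.toList = []
  · unfold generate_keycounts generate_keycounts_alt
    rw [hemp, show PySem.List.sorted ([] : List Char) (fun x => x) false = [] from
      (PySem.List.sorted_eq_nil_iff [] _ false).mpr rfl]
    simp
  · set l := keycheck.toList with hl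
    set ks := PySem.List.sorted (PySem.Set.ofList l) (fun x => x) false with hks
    have hpw : ks.Pairwise (· < ·) := PySem.List.sorted_ofList_pairwise_lt l
    have hksne : ks ≠ [] := by
      rw [hks, Ne, PySem.List.sorted_eq_nil_iff]
      intro h
      rcases List.exists_mem_of_ne_nil l hemp with ⟨x, hx⟩
      have := (PySem.Set.mem_ofList l x).mpr hx
      simp [h] at this
    obtain ⟨k0, ks', hks0⟩ := List.exists_cons_of_ne_nil hksne
    have hcnt : ∀ k ∈ ks, 1 ≤ l.count k := by
      intro k hk
      rw [hks, PySem.List.mem_sorted, PySem.Set.mem_ofList] at hk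
      exact List.one_le_count_iff.mpr hk
    have hk0cnt : 1 ≤ l.count k0 := hcnt k0 (by rw [hks0]; simp)
    have hchain : ks.Pairwise (· ≠ ·) := hpw.imp ne_of_lt
    have hrep : List.replicate (l.count k0) k0 = k0 :: List.replicate (l.count k0 - 1) k0 := by
      rw [← List.replicate_succ]; congr 1; omega
    have hsl : PySem.List.sorted l (fun x => x) false =
        List.replicate (l.count k0) k0 ++
          ((ks'.map (fun k => List.replicate (l.count k) k)).flatten) := by
      rw [kc_sorted_flatten l, ← hks, hks0]; simp
    -- compute both sides
    unfold generate_keycounts generate_keycounts_alt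
    rw [← hl]
    rw [if_neg (by simp [hemp])]
    have hcounter : l.foldl (fun d c => d.insert c (d.getD c 0 + 1)) PySem.Dict.empty
        = PySem.Dict.counter l := PySem.Dict.foldl_insert_getD_add_one_eq_counter l
    simp only [hcounter, PySem.Dict.keys_counter, PySem.Dict.getD_counter, ← hks]
    cases hsort : PySem.List.sorted l (fun x => x) false with
    | nil => exact absurd ((PySem.List.sorted_eq_nil_iff l _ false).mp hsort) hemp
    | cons c0 rest =>
      have h2 : c0 :: rest = k0 :: (List.replicate (l.count k0 - 1) k0 ++
          ((ks'.map (fun k => List.replicate (l.count k) k)).flatten)) := by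
        rw [← List.cons_append, ← hrep, ← hsl, hsort]
      rw [List.cons.injEq] at h2
      obtain ⟨rfl, hrest⟩ := h2
      -- evaluate B's fold
      have hfold : (c0 :: rest).foldl kcStep ([], c0, 0) =
          ((ks'.map (fun k => List.replicate (l.count k) k)).flatten).foldl kcStep
            ([], c0, (l.count c0 : Int)) := by
        rw [List.foldl_cons,
          show kcStep ([], c0, (0:Int)) c0 = ([], c0, 1) by simp [kcStep],
          hrest, List.foldl_append, kc_run,
          show (1 : Int) + ((l.count c0 - 1 : Nat) : Int) = ((l.count c0 : Nat) : Int) by omega]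
      simp only [hfold]
      have hloop := kc_loop ks' (fun k => l.count k) c0 [] ((l.count c0 : Int))
        (by rw [← hks0]; exact hchain) (fun k hk => hcnt k (by rw [hks0]; simp [hk]))
      simp only at hloop
      rw [hloop]
      rw [kc_join_semi _ (by rw [hks0]; simp)]
      rw [hks0]
      simp [kcFmt, Function.comp_def, List.cons_append, List.append_assoc]

-- ===== VERDICT (by name: the statement is the Claim_ definition above) =====
theorem generate_keycounts_spec : Claim_equal_generate_keycounts := fun k _ => kc_main k
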